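-- pv_equiv track=rewrite | github.com/k5sano/patent-compare | modules/cited_ref_notation.py | _format_str_list
-- ===== SOURCE A (Python) =====
-- from typing import Iterable
--
-- def _format_int_list(xs: Iterable[int]) -> str:
--     """[20, 39, 41, 42, 43] → '20、39、41〜43'"""
--     xs = list(xs)
--     if not xs:
--         return ""
--     # 連続区間をまとめる
--     runs: list[tuple[int, int]] = []
--     a = b = xs[0]
--     for x in xs[1:]:
--         if x == b + 1:
--             b = x
--         else:
--             runs.append((a, b))
--             a = b = x
--     runs.append((a, b))
--     parts = []
--     for s, e in runs:
--         if s == e: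
--             parts.append(str(s))
--         elif e == s + 1:
--             parts.append(f"{s}、{e}")
--         else:
--             parts.append(f"{s}〜{e}")
--     return "、".join(parts)
--
-- def _format_str_list(xs: Iterable[str]) -> str:
--     """図番などの文字列リストを '1、6、1a' のように整形。連番は範囲表記に。"""
--     xs = list(xs)
--     if not xs:
--         return ""
--     # 数字のみのもの／英字混じりのもの に分けて、数字のみ部分は範囲化
--     pure: list[int] = []
--     mixed: list[str] = []
--     for x in xs:
--         if x.isdigit():
--             pure.append(int(x))
--         else:
--             mixed.append(x)
--     out_parts: list[str] = []
--     if pure: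
--         out_parts.append(_format_int_list(pure))
--     if mixed:
--         out_parts.extend(mixed)
--     return "、".join(p for p in out_parts if p)
-- ===== SOURCE B (Python) =====
-- def _format_str_list(xs):
--     """Same output as A: digit-only items compressed into runs, others appended.
--     Different decomposition: comprehensions for the split, one consuming loop
--     per run (no (a,b) accumulator, no runs list, no final filter pass)."""
--     xs = list(xs)
--     pure = [int(x) for x in xs if x.isdigit()]
--     mixed = [x for x in xs if x and not x.isdigit()]
--     parts = []
--     rest = pure
--     while rest:
--         s, rest = rest[0], rest[1:]
--         e = s
--         while rest and rest[0] == e + 1: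
--             e, rest = rest[0], rest[1:]
--         parts.append(str(s) if s == e else (f"{s}、{e}" if e == s + 1 else f"{s}〜{e}"))
--     return "、".join(parts + mixed)
-- ===== Notes on version B (the rewrite author's own statement) =====
-- stated objective: simpler
-- what changed: Replaces A's three accumulator passes (running (a,b) state building a runs list, a second loop formatting runs, a final emptiness filter) with comprehensions for the digit/mixed split and a single nested loop that consumes each consecutive run and emits its formatted part directly; no runs list and no filter pass.
import Mathlib
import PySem

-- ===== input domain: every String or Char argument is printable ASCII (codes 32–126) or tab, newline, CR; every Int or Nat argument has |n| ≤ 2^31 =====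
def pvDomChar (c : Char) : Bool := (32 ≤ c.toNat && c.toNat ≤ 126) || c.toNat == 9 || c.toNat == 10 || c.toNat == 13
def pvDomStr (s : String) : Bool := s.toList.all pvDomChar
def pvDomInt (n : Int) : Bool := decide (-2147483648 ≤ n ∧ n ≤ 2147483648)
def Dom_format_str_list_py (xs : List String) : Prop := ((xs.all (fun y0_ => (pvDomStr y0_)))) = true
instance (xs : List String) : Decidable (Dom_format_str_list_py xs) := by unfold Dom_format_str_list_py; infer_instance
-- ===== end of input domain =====

-- B replaces A's accumulator passes (runs list + format loop + filter) by one nested loop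
-- that consumes each consecutive run and emits its part directly (objective: simpler).

-- ===== PORT A =====

-- int(x); in both ports x satisfies x.isdigit(), so ofStr? is always `some` (getD never fires)
def pvToInt (x : String) : Int := (PySem.Int.ofStr? x).getD 0

-- the three formatting branches (f-strings ported with ++, exact for str concatenation)
def pvFmtRun (s e : Int) : String :=
  if s = e then PySem.Int.toStr s
  else if e = s + 1 then PySem.Int.toStr s ++ "、" ++ PySem.Int.toStr e
  else PySem.Int.toStr s ++ "〜" ++ PySem.Int.toStr e

-- _format_int_list: runs fold with (runs, a, b) state, then the parts loop, then join
def pvFmtIntList (xs : List Int) : String :=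
  match xs with
  | [] => ""
  | x0 :: rest =>
    let st := rest.foldl
      (fun (acc : List (Int × Int) × Int × Int) x =>
        if x = acc.2.2 + 1 then (acc.1, acc.2.1, x)
        else (acc.1 ++ [(acc.2.1, acc.2.2)], x, x))
      ([], x0, x0)
    let runs := st.1 ++ [st.2]
    let parts := runs.foldl (fun ps se => ps ++ [pvFmtRun se.1 se.2]) []
    PySem.Str.join "、" parts

def format_str_list_py (xs : List String) : String :=
  if xs.isEmpty then "" else
  let pm := xs.foldl
    (fun (acc : List Int × List String) x =>
      if PySem.Str.strIsdigit x then (acc.1 ++ [pvToInt x], acc.2)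
      else (acc.1, acc.2 ++ [x]))
    ([], [])
  let pure := pm.1
  let mixed := pm.2
  let out_parts : List String := if pure.isEmpty then [] else [pvFmtIntList pure]
  let out_parts := if mixed.isEmpty then out_parts else out_parts ++ mixed
  PySem.Str.join "、" (out_parts.filter (fun p => !(p == "")))

-- ===== PORT B =====

-- inner while: consume the maximal consecutive run, return its end and the rest
def pvRunEnd (e : Int) (rest : List Int) : Int × List Int :=
  match rest with
  | [] => (e, [])
  | x :: t => if x = e + 1 then pvRunEnd x t else (e, x :: t)

theorem pvRunEnd_length_le (e : Int) (l : List Int) : (pvRunEnd e l).2.length ≤ l.length := by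
  induction l generalizing e with
  | nil => simp [pvRunEnd]
  | cons x t ih =>
    simp only [pvRunEnd]
    split
    · exact le_trans (ih x) (Nat.le_succ _)
    · simp

-- outer while: one formatted part per run
def pvCollect (rest : List Int) (parts : List String) : List String :=
  match rest with
  | [] => parts
  | s :: t => pvCollect (pvRunEnd s t).2 (parts ++ [pvFmtRun s (pvRunEnd s t).1])
termination_by rest.length
decreasing_by exact Nat.lt_succ_of_le (pvRunEnd_length_le s t)

def format_str_list_py_alt (xs : List String) : String :=
  let pure := (xs.filter (fun x => PySem.Str.strIsdigit x)).map pvToInt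
  let mixed := xs.filter (fun x => !(x == "") && !(PySem.Str.strIsdigit x))
  PySem.Str.join "、" (pvCollect pure [] ++ mixed)

-- ===== PRECONDITION & SPEC =====
def Spec_format_str_list_py (xs : List String) (out : String) : Prop := out = format_str_list_py_alt xs
instance (xs : List String) (out : String) : Decidable (Spec_format_str_list_py xs out) := by unfold Spec_format_str_list_py; infer_instance

-- ===== CLAIM (what is proved, stated in full; the proofs are below) =====
def Claim_equal_format_str_list_py : Prop := ∀ (xs : List String), Dom_format_str_list_py xs → Spec_format_str_list_py xs (format_str_list_py xs)

-- ===== LEMMAS AND PROOFS =====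

-- A's split loop = filter/map comprehensions
theorem pv_split_eq (xs : List String) (p : List Int) (m : List String) :
    xs.foldl
      (fun (acc : List Int × List String) x =>
        if PySem.Str.strIsdigit x then (acc.1 ++ [pvToInt x], acc.2)
        else (acc.1, acc.2 ++ [x]))
      (p, m)
    = (p ++ (xs.filter (fun x => PySem.Str.strIsdigit x)).map pvToInt,
       m ++ xs.filter (fun x => !(PySem.Str.strIsdigit x))) := by
  induction xs generalizing p m with
  | nil => simp
  | cons x t ih =>
    simp only [List.foldl_cons, List.filter_cons]
    by_cases h : PySem.Str.strIsdigit x = true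
    · simp only [h, Bool.not_true, Bool.false_eq_true, if_true, if_false,
        ih, List.map_cons, List.append_assoc, List.singleton_append]
    · simp only [Bool.not_eq_true] at h
      simp only [h, Bool.not_false, Bool.false_eq_true, if_true, if_false,
        ih, List.map_cons, List.append_assoc, List.singleton_append]

-- A's parts loop = map
theorem pv_parts_eq (rs : List (Int × Int)) (acc : List String) :
    rs.foldl (fun ps se => ps ++ [pvFmtRun se.1 se.2]) acc
    = acc ++ rs.map (fun se => pvFmtRun se.1 se.2) := by
  induction rs generalizing acc with
  | nil => simp
  | cons r t ih => simp [ih]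

-- reference form of A's runs fold
def pvRunsRec (a b : Int) (l : List Int) : List (Int × Int) :=
  match l with
  | [] => [(a, b)]
  | x :: t => if x = b + 1 then pvRunsRec a x t else (a, b) :: pvRunsRec x x t

theorem pv_runs_eq (l : List Int) (runs : List (Int × Int)) (a b : Int) :
    (let st := l.foldl
        (fun (acc : List (Int × Int) × Int × Int) x =>
          if x = acc.2.2 + 1 then (acc.1, acc.2.1, x)
          else (acc.1 ++ [(acc.2.1, acc.2.2)], x, x))
        (runs, a, b);
      st.1 ++ [st.2]) = runs ++ pvRunsRec a b l := by
  induction l generalizing runs a b with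
  | nil => simp [pvRunsRec]
  | cons x t ih =>
    simp only [List.foldl_cons, pvRunsRec]
    by_cases h : x = b + 1
    · simp [h, ih]
    · simp [h, ih]

theorem pvCollect_append (l : List Int) (parts : List String) :
    pvCollect l parts = parts ++ pvCollect l [] := by
  match l with
  | [] => simp [pvCollect]
  | s :: t =>
    rw [pvCollect, pvCollect]
    rw [pvCollect_append (pvRunEnd s t).2 (parts ++ [pvFmtRun s (pvRunEnd s t).1])]
    rw [pvCollect_append (pvRunEnd s t).2 ([] ++ [pvFmtRun s (pvRunEnd s t).1])]
    simp
termination_by l.length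
decreasing_by all_goals exact Nat.lt_succ_of_le (pvRunEnd_length_le s t)

-- bridge: A's runs (mapped) are exactly what B's nested loop emits
theorem pv_bridge (l : List Int) (a b : Int) :
    (pvRunsRec a b l).map (fun se => pvFmtRun se.1 se.2)
    = pvFmtRun a (pvRunEnd b l).1 :: pvCollect (pvRunEnd b l).2 [] := by
  induction l generalizing a b with
  | nil => simp [pvRunsRec, pvRunEnd, pvCollect]
  | cons x t ih =>
    simp only [pvRunsRec, pvRunEnd]
    by_cases h : x = b + 1
    · subst h
      rw [if_pos rfl, if_pos rfl]
      exact ih a _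
    · rw [if_neg h, if_neg h, List.map_cons, ih x x]
      conv_rhs => rw [pvCollect, pvCollect_append]
      simp

theorem pvFmtIntList_cons (s : Int) (t : List Int) :
    pvFmtIntList (s :: t) = PySem.Str.join "、" (pvCollect (s :: t) []) := by
  have hA : pvFmtIntList (s :: t)
      = PySem.Str.join "、" ((pvRunsRec s s t).map (fun se => pvFmtRun se.1 se.2)) := by
    simp only [pvFmtIntList]
    rw [pv_runs_eq, List.nil_append, pv_parts_eq, List.nil_append]
  rw [hA, pv_bridge t s s]
  conv_rhs => rw [pvCollect, pvCollect_append]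
  simp

theorem pv_toStr_ne (n : Int) : PySem.Int.toStr n ≠ "" := by
  intro h
  have h' : (PySem.Int.toStr n).toList = ("" : String).toList := by rw [h]
  rw [PySem.Int.toList_toStr] at h'
  have hd : ∀ (b fuel m : Nat) (acc : List Char), acc.length ≤ (Nat.toDigitsCore b fuel m acc).length := by
    intro b fuel
    induction fuel with
    | zero => intro m acc; simp [Nat.toDigitsCore]
    | succ f ihf =>
      intro m acc
      rw [Nat.toDigitsCore]
      split
      · simp
      · exact le_trans (by simp) (ihf _ _)
  have hne : ∀ (b m : Nat), Nat.toDigits b m ≠ [] := by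
    intro b m hnil
    rw [Nat.toDigits, Nat.toDigitsCore] at hnil
    split at hnil
    · exact absurd hnil (by simp)
    · have := hd b m (m / b) [(m % b).digitChar]
      rw [hnil] at this
      simp at this
  unfold PySem.Int.toChars at h'
  split at h'
  · simp at h'
  · exact hne _ _ h'

theorem pvFmtRun_ne (s e : Int) : pvFmtRun s e ≠ "" := by
  unfold pvFmtRun
  have key : ∀ (u v : String), u ≠ "" → u ++ v ≠ "" := by
    intro u v hu h
    apply hu
    have := congrArg String.toList h
    simp only [String.toList_append] at this
    have hu' : u.toList = [] := List.eq_nil_of_append_eq_nil this |>.1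
    exact String.toList_eq_nil_iff.mp hu'
  split
  · exact pv_toStr_ne s
  · split
    · exact key _ _ (key _ _ (pv_toStr_ne s))
    · exact key _ _ (key _ _ (pv_toStr_ne s))

theorem pv_join_cons_ne (sep : String) (p : String) (rest : List String) (hp : p ≠ "") :
    PySem.Str.join sep (p :: rest) ≠ "" := by
  intro h
  have h' := congrArg String.toList h
  rw [PySem.Str.toList_join] at h'
  apply hp
  have hp' : p.toList = [] := by
    cases rest with
    | nil => simpa [PySem.Chars.join_singleton] using h'
    | cons q r =>
      rw [List.map_cons, List.map_cons, PySem.Chars.join_cons_cons] at h'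
      exact (List.eq_nil_of_append_eq_nil ((List.eq_nil_of_append_eq_nil h').1)).1
  exact String.toList_eq_nil_iff.mp hp'

-- join sep (join sep ps :: ms) = join sep (ps ++ ms) for nonempty ps
theorem pv_chars_glue (sep x y : List Char) (ms : List (List Char)) :
    PySem.Chars.join sep ((x ++ sep ++ y) :: ms) = x ++ sep ++ PySem.Chars.join sep (y :: ms) := by
  cases ms with
  | nil => simp [PySem.Chars.join_singleton]
  | cons m r => simp [PySem.Chars.join_cons_cons]

theorem pv_chars_flatten (sep : List Char) (ps : List (List Char)) (ms : List (List Char)) (h : ps ≠ []) :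
    PySem.Chars.join sep (PySem.Chars.join sep ps :: ms) = PySem.Chars.join sep (ps ++ ms) := by
  induction ps with
  | nil => exact absurd rfl h
  | cons a t ih =>
    cases t with
    | nil => simp [PySem.Chars.join_singleton]
    | cons b r =>
      rw [PySem.Chars.join_cons_cons, pv_chars_glue, ih (by simp)]
      simp [PySem.Chars.join_cons_cons]

theorem pv_str_flatten (sep : String) (ps ms : List String) (h : ps ≠ []) :
    PySem.Str.join sep (PySem.Str.join sep ps :: ms) = PySem.Str.join sep (ps ++ ms) := by
  unfold PySem.Str.join
  rw [List.map_cons]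
  have : (String.ofList (PySem.Chars.join sep.toList (ps.map String.toList))).toList
      = PySem.Chars.join sep.toList (ps.map String.toList) := by
    simp
  rw [this, pv_chars_flatten _ _ _ (by simpa using h), List.map_append]

theorem pv_filter_filter (xs : List String) :
    (xs.filter (fun x => !(PySem.Str.strIsdigit x))).filter (fun p => !(p == ""))
    = xs.filter (fun x => !(x == "") && !(PySem.Str.strIsdigit x)) := by
  rw [List.filter_filter]

-- ===== VERDICT (by name: the statement is the Claim_ definition above) =====
theorem format_str_list_py_spec : Claim_equal_format_str_list_py := by
  intro xs _
  unfold Spec_format_str_list_py format_str_list_py format_str_list_py_alt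
  cases xs with
  | nil => simp [pvCollect, PySem.Str.join, PySem.Chars.join, List.intercalate]
  | cons x0 xt =>
    rw [if_neg (by simp : ¬((x0 :: xt).isEmpty = true))]
    rw [pv_split_eq]
    simp only [List.nil_append, ← pv_filter_filter (x0 :: xt)]
    set P := ((x0 :: xt).filter (fun x => PySem.Str.strIsdigit x)).map pvToInt with hP
    set M := (x0 :: xt).filter (fun x => !(PySem.Str.strIsdigit x)) with hM
    cases hPc : P with
    | nil =>
      by_cases hM0 : M = []
      · rw [hM0]
        simp [pvCollect, PySem.Str.join, PySem.Chars.join, List.intercalate]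
      · rw [if_neg (by simpa [List.isEmpty_iff] using hM0)]
        simp [pvCollect]
    | cons s t =>
      have hPne : pvFmtIntList (s :: t) ≠ "" := by
        rw [pvFmtIntList_cons, pvCollect, pvCollect_append, List.nil_append]
        exact pv_join_cons_ne _ _ _ (pvFmtRun_ne _ _)
      have hcolne : pvCollect (s :: t) [] ≠ [] := by
        rw [pvCollect, pvCollect_append, List.nil_append]
        simp
      have hfil1 : ([pvFmtIntList (s :: t)]).filter (fun p => !(p == "")) = [pvFmtIntList (s :: t)] := by
        rw [List.filter_cons, if_pos (by simp [hPne]), List.filter_nil]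
      rw [if_neg (by simp : ¬((s :: t).isEmpty = true))]
      by_cases hM0 : M = []
      · rw [hM0, if_pos (by simp : ([] : List String).isEmpty = true), hfil1,
          List.filter_nil, List.append_nil, pvFmtIntList_cons]
        have := pv_str_flatten "、" (pvCollect (s :: t) []) [] hcolne
        rw [List.append_nil] at this
        exact this
      · rw [if_neg (by simpa [List.isEmpty_iff] using hM0), List.filter_append, hfil1,
          List.singleton_append, pvFmtIntList_cons]
        exact pv_str_flatten "、" (pvCollect (s :: t) []) _ hcolne
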